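-- pv_equiv track=rewrite | github.com/prachiraut711/RSL_Practice | que_86.py | sort_binary_array
-- ===== SOURCE A (Python) =====
-- def sort_binary_array(arr):
--     zeros = []
--     ones = []
--     for i in arr:
--         if i == 0:
--             zeros.append(i)
--         else:
--             ones.append(i)
--     return zeros + ones
-- ===== SOURCE B (Python) =====
-- def sort_binary_array(arr):
--     # stable sort: zeros (key False) keep order and come before non-zeros (key True)
--     return sorted(arr, key=lambda x: x != 0)
-- ===== Notes on version B (the rewrite author's own statement) =====
-- stated objective: idiomatic
-- what changed: Replaces the two-bucket append loop with a single stable sorted() call keyed on x != 0; stability keeps both groups in original order.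
import Mathlib
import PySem

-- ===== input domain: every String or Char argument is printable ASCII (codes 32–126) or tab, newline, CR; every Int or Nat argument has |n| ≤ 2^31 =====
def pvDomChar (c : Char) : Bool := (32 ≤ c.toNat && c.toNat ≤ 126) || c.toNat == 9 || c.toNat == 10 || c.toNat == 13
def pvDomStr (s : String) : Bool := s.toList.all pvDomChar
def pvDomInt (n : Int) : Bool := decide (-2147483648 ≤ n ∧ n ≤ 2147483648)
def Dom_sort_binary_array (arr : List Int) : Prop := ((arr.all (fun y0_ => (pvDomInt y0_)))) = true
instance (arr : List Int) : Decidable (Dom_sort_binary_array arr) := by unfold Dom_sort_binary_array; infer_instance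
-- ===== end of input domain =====

-- B replaces A's two-bucket append loop by one stable sorted() keyed on x != 0 (idiomatic; not faster).

-- ===== PORT A =====
-- two accumulators (zeros, ones), appended to in order, then concatenated
def sort_binary_array (arr : List Int) : List Int :=
  let p := arr.foldl
    (fun (acc : List Int × List Int) i =>
      if i = 0 then (acc.1 ++ [i], acc.2) else (acc.1, acc.2 ++ [i]))
    ([], [])
  p.1 ++ p.2

-- ===== PORT B =====
-- sorted(arr, key=lambda x: x != 0)
def sort_binary_array_alt (arr : List Int) : List Int :=
  PySem.List.sorted arr (fun x => decide (x ≠ 0)) false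

-- ===== PRECONDITION & SPEC =====
def Spec_sort_binary_array (arr : List Int) (out : List Int) : Prop := out = sort_binary_array_alt arr
instance (arr : List Int) (out : List Int) : Decidable (Spec_sort_binary_array arr out) := by unfold Spec_sort_binary_array; infer_instance

-- ===== CLAIM (what is proved, stated in full; the proofs are below) =====
def Claim_equal_sort_binary_array : Prop := ∀ (arr : List Int), Dom_sort_binary_array arr → Spec_sort_binary_array arr (sort_binary_array arr)

-- ===== LEMMAS AND PROOFS =====

-- A's foldl, started from any pair of buckets, appends the zeros to the first and the rest to the second
theorem pv_bucket_foldl (arr zs os : List Int) :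
    arr.foldl
      (fun (acc : List Int × List Int) i =>
        if i = 0 then (acc.1 ++ [i], acc.2) else (acc.1, acc.2 ++ [i]))
      (zs, os)
    = (zs ++ arr.filter (fun x => decide (x = 0)), os ++ arr.filter (fun x => decide (x ≠ 0))) := by
  induction arr generalizing zs os with
  | nil => simp
  | cons x rest ih =>
    by_cases hx : x = 0 <;> simp [hx, ih]

-- inserting a zero into (all-zero zs) ++ (all-nonzero os) puts it between the blocks
theorem pv_insert_zero (x : Int) (hx : x = 0) (zs os : List Int)
    (hz : ∀ z ∈ zs, z = 0) (ho : ∀ o ∈ os, o ≠ 0) :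
    PySem.List.insertBy
      (fun a b => decide ((decide (a ≠ 0) : Bool) < (decide (b ≠ 0) : Bool))) x (zs ++ os)
    = zs ++ x :: os := by
  induction zs with
  | nil =>
    cases os with
    | nil => simp [PySem.List.insertBy]
    | cons o t =>
      have ho' : o ≠ 0 := ho o (by simp)
      simp [PySem.List.insertBy, hx, ho']
  | cons z t ih =>
    subst hx
    have hz0 : z = 0 := hz z (by simp)
    subst hz0
    have ih' := ih (fun a ha => hz a (by simp [ha]))
    simp only [List.cons_append, PySem.List.insertBy]
    rw [if_neg (by decide), ih']

-- inserting a non-zero element appends it at the very end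
theorem pv_insert_nonzero (x : Int) (hx : x ≠ 0) (l : List Int) :
    PySem.List.insertBy
      (fun a b => decide ((decide (a ≠ 0) : Bool) < (decide (b ≠ 0) : Bool))) x l
    = l ++ [x] := by
  apply PySem.List.insertBy_of_forall_not_before
  intro y _
  simp [hx]

-- the stable insertion sort, started from a zeros-then-nonzeros state, equals the bucket concatenation
theorem pv_sorted_foldl (arr zs os : List Int)
    (hz : ∀ z ∈ zs, z = 0) (ho : ∀ o ∈ os, o ≠ 0) :
    arr.foldl
      (fun acc x => PySem.List.insertBy
        (fun a b => decide ((decide (a ≠ 0) : Bool) < (decide (b ≠ 0) : Bool))) x acc)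
      (zs ++ os)
    = (zs ++ arr.filter (fun x => decide (x = 0))) ++ (os ++ arr.filter (fun x => decide (x ≠ 0))) := by
  induction arr generalizing zs os with
  | nil => simp
  | cons x rest ih =>
    by_cases hx : x = 0
    · have h1 := pv_insert_zero x hx zs os hz ho
      have h2 := ih (zs ++ [x])
        os
        (by intro z hzz; rcases List.mem_append.mp hzz with h | h
            · exact hz z h
            · simp at h; omega)
        ho
      simp only [List.foldl_cons, h1]
      have : zs ++ x :: os = (zs ++ [x]) ++ os := by simp
      rw [this, h2]
      simp [hx]
    · have h1 := pv_insert_nonzero x hx (zs ++ os)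
      have h2 := ih zs (os ++ [x]) hz
        (by intro o hoo; rcases List.mem_append.mp hoo with h | h
            · exact ho o h
            · simp at h; omega)
      simp only [List.foldl_cons, h1]
      have : (zs ++ os) ++ [x] = zs ++ (os ++ [x]) := by simp
      rw [this, h2]
      simp [hx]

-- ===== VERDICT (by name: the statement is the Claim_ definition above) =====
theorem sort_binary_array_spec : Claim_equal_sort_binary_array := by
  intro arr _
  unfold Spec_sort_binary_array sort_binary_array sort_binary_array_alt
  rw [PySem.List.sorted_eq_foldl_insertBy]
  have hs := pv_sorted_foldl arr [] [] (by simp) (by simp)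
  simp only [List.nil_append] at hs
  rw [hs, pv_bucket_foldl arr [] []]
  simp
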